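-- pv_equiv track=rewrite | github.com/IcySnowy16/VForObvious | ProgressTrackerTeleBotz/progress_tracker/bot.py | _parse_import_args
-- ===== SOURCE A (Python) =====
-- from typing import Any, Dict, List, Tuple
--
-- def _parse_import_args(args: List[str]) -> Tuple[str, str]:
--     mode = "replace"
--     scope = "user"
--     for arg in args:
--         lowered = arg.strip().lower()
--         if lowered in {"merge", "replace"}:
--             mode = lowered
--         elif lowered in {"all", "db", "full"}:
--             scope = "all"
--     return mode, scope
-- ===== SOURCE B (Python) =====
-- def _parse_import_args(args):
--     scope = "all" if any(a.strip().lower() in {"all", "db", "full"} for a in args) else "user"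
--     mode = next((l for a in reversed(args) if (l := a.strip().lower()) in {"merge", "replace"}), "replace")
--     return mode, scope
-- ===== Notes on version B (the rewrite author's own statement) =====
-- stated objective: alternative
-- what changed: Replaces A's single forward loop carrying a (mode, scope) accumulator with two independent stateless passes: an existential scan for scope and a reversed-order first-match scan for mode.
import Mathlib
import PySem

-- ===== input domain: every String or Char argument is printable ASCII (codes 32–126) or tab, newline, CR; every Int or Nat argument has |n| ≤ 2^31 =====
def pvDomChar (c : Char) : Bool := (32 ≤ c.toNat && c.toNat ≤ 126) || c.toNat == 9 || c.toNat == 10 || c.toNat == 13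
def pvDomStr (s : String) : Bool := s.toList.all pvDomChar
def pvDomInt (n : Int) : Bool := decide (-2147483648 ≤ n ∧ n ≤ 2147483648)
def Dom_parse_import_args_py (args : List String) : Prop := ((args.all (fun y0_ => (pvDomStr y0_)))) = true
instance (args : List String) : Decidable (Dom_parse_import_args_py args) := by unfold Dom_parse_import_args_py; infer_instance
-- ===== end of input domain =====

-- B replaces A's single accumulating forward loop by two independent passes (an existential
-- scan for scope, a reversed first-match scan for mode); same cost, alternative decomposition.

-- ===== PORT A =====
-- A: one forward fold carrying the (mode, scope) accumulator, branches in A's order.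
def pvStepA (ms : String × String) (arg : String) : String × String :=
  let lowered := PySem.Str.lower (PySem.Str.strip arg)
  if lowered == "merge" || lowered == "replace" then (lowered, ms.2)
  else if lowered == "all" || lowered == "db" || lowered == "full" then (ms.1, "all")
  else ms

def parse_import_args_py (args : List String) : String × String :=
  args.foldl pvStepA ("replace", "user")

-- ===== PORT B =====
-- B-side helper: first match in the (already reversed) list, with default fallback.
def pvModeRev (xs : List String) (dflt : String) : String :=
  match xs with
  | [] => dflt
  | a :: t =>
    let l := PySem.Str.lower (PySem.Str.strip a)
    if l == "merge" || l == "replace" then l else pvModeRev t dflt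

def parse_import_args_py_alt (args : List String) : String × String :=
  let scope := if args.any (fun a =>
      let l := PySem.Str.lower (PySem.Str.strip a)
      l == "all" || l == "db" || l == "full") then "all" else "user"
  (pvModeRev args.reverse "replace", scope)

-- ===== PRECONDITION & SPEC =====
def Spec_parse_import_args_py (args : List String) (out : String × String) : Prop := out = parse_import_args_py_alt args
instance (args : List String) (out : String × String) : Decidable (Spec_parse_import_args_py args out) := by unfold Spec_parse_import_args_py; infer_instance

-- ===== CLAIM (what is proved, stated in full; the proofs are below) =====
def Claim_equal_parse_import_args_py : Prop := ∀ (args : List String), Dom_parse_import_args_py args → Spec_parse_import_args_py args (parse_import_args_py args)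

-- ===== LEMMAS AND PROOFS =====

theorem pvModeRev_append (xs : List String) (a : String) (d : String) :
    pvModeRev (xs ++ [a]) d =
      pvModeRev xs (let l := PySem.Str.lower (PySem.Str.strip a)
                    if l == "merge" || l == "replace" then l else d) := by
  induction xs with
  | nil => rfl
  | cons x t ih => simp only [List.cons_append, pvModeRev, ih]

theorem pv_main (args : List String) (m s : String) :
    args.foldl pvStepA (m, s) =
    (pvModeRev args.reverse m,
     if args.any (fun a =>
        let l := PySem.Str.lower (PySem.Str.strip a)
        l == "all" || l == "db" || l == "full") then "all" else s) := by
  induction args generalizing m s with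
  | nil => rfl
  | cons a t ih =>
    simp only [List.foldl_cons, List.any_cons, List.reverse_cons, pvModeRev_append, pvStepA]
    by_cases h1 : (PySem.Str.lower (PySem.Str.strip a) == "merge" || PySem.Str.lower (PySem.Str.strip a) == "replace") = true
    · have h2 : (PySem.Str.lower (PySem.Str.strip a) == "all" || PySem.Str.lower (PySem.Str.strip a) == "db" || PySem.Str.lower (PySem.Str.strip a) == "full") = false := by
        rcases Bool.or_eq_true_iff.mp h1 with h | h <;>
          rw [beq_iff_eq] at h <;> rw [h] <;> decide
      simp only [h1, h2, if_pos, Bool.false_or, ih]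
    · by_cases h2 : (PySem.Str.lower (PySem.Str.strip a) == "all" || PySem.Str.lower (PySem.Str.strip a) == "db" || PySem.Str.lower (PySem.Str.strip a) == "full") = true
      · simp only [Bool.not_eq_true] at h1
        simp only [h1, h2, Bool.false_eq_true, if_false, if_true, Bool.true_or, ih, ite_self]
      · simp only [Bool.not_eq_true] at h1 h2
        simp only [h1, h2, Bool.false_eq_true, if_false, Bool.false_or, ih]

-- ===== VERDICT (by name: the statement is the Claim_ definition above) =====
theorem parse_import_args_py_spec : Claim_equal_parse_import_args_py := by
  intro args _
  show parse_import_args_py args = parse_import_args_py_alt args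
  unfold parse_import_args_py parse_import_args_py_alt
  exact pv_main args "replace" "user"
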